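-- pv_equiv track=rewrite | github.com/aalacy/storelocatore-scrapers | apify/CalinClaudiu/storelocator/localfirstbank_com/scrape.py | fix_comma
-- ===== SOURCE A (Python) =====
-- def fix_comma(x):
--     h = []
--
--     x = x.replace("None", "")
--     try:
--         x = x.split(",")
--         for i in x:
--             if len(i) > 1:
--                 h.append(i)
--         h = ", ".join(h)
--     except:
--         h = x
--
--     if len(h) < 2:
--         h = "<MISSING>"
--
--     backup = h
--     if "P.O." in h:
--         h = h.split("P.O.")[0].strip()
--         if len(h) > 3:
--             return fix_comma(h)
--         else:
--             h = backup
--             h = h.split("P.O.")[1].strip()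
--             return fix_comma(h)
--     return h
-- ===== SOURCE B (Python) =====
-- def fix_comma(x):
--     while True:
--         h = ", ".join([p for p in x.replace("None", "").split(",") if len(p) > 1])
--         if len(h) < 2:
--             h = "<MISSING>"
--         seg = h.split("P.O.")
--         if len(seg) == 1:
--             return h
--         head = seg[0].strip()
--         x = head if len(head) > 3 else seg[1].strip()
-- ===== Notes on version B (the rewrite author's own statement) =====
-- stated objective: simpler
-- what changed: A's tail recursion with a dead try/except, an explicit append-loop and two separate splits on the box marker behind a membership test becomes a while-True loop that rebinds the working string, builds the joined address with a list comprehension, and splits on the marker once, branching on the number of segments.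
import Mathlib
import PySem

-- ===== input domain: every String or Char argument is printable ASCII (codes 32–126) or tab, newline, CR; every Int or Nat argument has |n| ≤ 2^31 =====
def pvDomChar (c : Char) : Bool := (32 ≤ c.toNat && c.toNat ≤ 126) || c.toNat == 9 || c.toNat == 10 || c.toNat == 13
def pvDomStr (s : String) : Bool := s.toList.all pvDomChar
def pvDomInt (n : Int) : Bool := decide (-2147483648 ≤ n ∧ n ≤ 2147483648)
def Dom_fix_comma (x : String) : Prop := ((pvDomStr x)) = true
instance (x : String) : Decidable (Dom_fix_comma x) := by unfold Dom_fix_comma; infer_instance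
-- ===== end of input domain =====

-- B replaces A's tail recursion, dead try/except and append-loop with a `while True`
-- loop over a comprehension and a single split("P.O."); same cost, plainer code.

-- ===== PORT A =====
-- Python's recursion has no a-priori bound; the port threads a fuel of x.length + 2,
-- which is ample: every recursion level consumes a "P.O." occurrence whose (possibly
-- "None"-nested) source text costs at least 4 characters of the original string.
-- The `try/except` in A is dead code (str.split never raises), so the `except` branch
-- (h = x) is unreachable and not ported.  `split("P.O.")[0]` / `[1]` are ported with
-- PySem.List.pyGetD: index 0 always exists, index 1 exists because "P.O." in h.
def fixCommaGoA : Nat → List Char → List Char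
  | 0, x => x   -- fuel exhausted; unreachable for the fuel fix_comma supplies
  | fuel + 1, x0 =>
    let x := PySem.Chars.replace x0 "None".toList []
    let xs := PySem.Chars.splitOn x ",".toList
    let h := List.foldl (fun h i => if 1 < PySem.Chars.len i then h ++ [i] else h) [] xs
    let h := PySem.Chars.join ", ".toList h
    let h := if PySem.Chars.len h < 2 then "<MISSING>".toList else h
    let backup := h
    if PySem.Chars.isIn "P.O.".toList h then
      let h1 := PySem.Chars.strip (PySem.List.pyGetD (PySem.Chars.splitOn h "P.O.".toList) 0 [])
      if 3 < PySem.Chars.len h1 then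
        fixCommaGoA fuel h1
      else
        fixCommaGoA fuel (PySem.Chars.strip (PySem.List.pyGetD (PySem.Chars.splitOn backup "P.O.".toList) 1 []))
    else h

def fix_comma (x : String) : String := String.ofList (fixCommaGoA (x.toList.length + 2) x.toList)

-- ===== PORT B =====
-- same fuel convention as A's port (the Python `while True` loop is unbounded)
def fixCommaGoB : Nat → List Char → List Char
  | 0, x => x   -- fuel exhausted; unreachable for the fuel fix_comma_alt supplies
  | fuel + 1, x =>
    let h0 := PySem.Chars.join ", ".toList
      ((PySem.Chars.splitOn (PySem.Chars.replace x "None".toList []) ",".toList).filter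
        (fun p => 1 < PySem.Chars.len p))
    let h := if PySem.Chars.len h0 < 2 then "<MISSING>".toList else h0
    let seg := PySem.Chars.splitOn h "P.O.".toList
    if seg.length == 1 then h
    else
      let head := PySem.Chars.strip (PySem.List.pyGetD seg 0 [])
      fixCommaGoB fuel
        (if 3 < PySem.Chars.len head then head
         else PySem.Chars.strip (PySem.List.pyGetD seg 1 []))

def fix_comma_alt (x : String) : String := String.ofList (fixCommaGoB (x.toList.length + 2) x.toList)

-- ===== PRECONDITION & SPEC =====
def Spec_fix_comma (x : String) (out : String) : Prop := out = fix_comma_alt x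
instance (x : String) (out : String) : Decidable (Spec_fix_comma x out) := by unfold Spec_fix_comma; infer_instance

-- ===== CLAIM (what is proved, stated in full; the proofs are below) =====
def Claim_equal_fix_comma : Prop := ∀ (x : String), Dom_fix_comma x → Spec_fix_comma x (fix_comma x)

-- ===== LEMMAS AND PROOFS =====

-- every result of splitOn.go carries at least acc.length + 1 pieces
theorem splitOn_go_len_ge (sep : List Char) :
    ∀ (fuel : Nat) (l cur : List Char) (acc : List (List Char)),
      acc.length + 1 ≤ (PySem.Chars.splitOn.go sep fuel l cur acc).length := by
  intro fuel
  induction fuel with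
  | zero => intro l cur acc; simp [PySem.Chars.splitOn.go]
  | succ n ih =>
    intro l cur acc
    cases l with
    | nil => simp [PySem.Chars.splitOn.go]
    | cons c rest =>
      rw [PySem.Chars.splitOn.go]
      split
      · have := ih (List.drop sep.length (c :: rest)) [] (cur.reverse :: acc)
        simp at this; omega
      · exact ih rest (c :: cur) acc

-- if sep does not occur in l, go just sweeps l into the current piece
theorem splitOn_go_no_occ (sep : List Char) :
    ∀ (fuel : Nat) (l cur : List Char) (acc : List (List Char)),
      ¬ sep <:+: l →
      PySem.Chars.splitOn.go sep fuel l cur acc = acc.reverse ++ [cur.reverse ++ l] := by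
  intro fuel
  induction fuel with
  | zero => intro l cur acc _; simp [PySem.Chars.splitOn.go]
  | succ n ih =>
    intro l cur acc hno
    cases l with
    | nil => simp [PySem.Chars.splitOn.go]
    | cons c rest =>
      rw [PySem.Chars.splitOn.go]
      split
      · exact absurd (List.IsPrefix.isInfix (List.isPrefixOf_iff_prefix.mp (by assumption))) hno
      · rw [ih rest (c :: cur) acc (fun h => hno (List.infix_cons_iff.mpr (Or.inr h)))]
        simp

-- if sep occurs in l, go produces at least two pieces beyond acc
theorem splitOn_go_occ (sep : List Char) (hsep : sep ≠ []) :
    ∀ (fuel : Nat) (l cur : List Char) (acc : List (List Char)),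
      l.length < fuel → sep <:+: l →
      acc.length + 2 ≤ (PySem.Chars.splitOn.go sep fuel l cur acc).length := by
  intro fuel
  induction fuel with
  | zero => intro l cur acc h _; omega
  | succ n ih =>
    intro l cur acc hlen hocc
    cases l with
    | nil => exact absurd (List.infix_nil.mp hocc) hsep
    | cons c rest =>
      rw [PySem.Chars.splitOn.go]
      split
      · have := splitOn_go_len_ge sep n (List.drop sep.length (c :: rest)) [] (cur.reverse :: acc)
        simp at this; omega
      · have hrest : sep <:+: rest := by
          rcases List.infix_cons_iff.mp hocc with hp | hi
          · exact absurd (List.isPrefixOf_iff_prefix.mpr hp) (by assumption)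
          · exact hi
        have : rest.length < n := by simp at hlen; omega
        exact ih rest (c :: cur) acc this hrest

theorem splitOn_len_one_iff (s sep : List Char) (hsep : sep ≠ []) :
    ((PySem.Chars.splitOn s sep).length == 1) = !(PySem.Chars.isIn sep s) := by
  cases hIn : PySem.Chars.isIn sep s with
  | false =>
    have := splitOn_go_no_occ sep (s.length + 1) s [] []
      ((PySem.Chars.isIn_eq_false_iff _ _).mp hIn)
    simp [PySem.Chars.splitOn, this]
  | true =>
    have := splitOn_go_occ sep hsep (s.length + 1) s [] [] (by omega)
      ((PySem.Chars.isIn_iff_infix _ _).mp hIn)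
    simp [PySem.Chars.splitOn]
    omega

-- an `if` on the recursion argument commutes with the recursive call
theorem ite_call_arg (c : Prop) [Decidable c] (f g : List Char → List Char)
    (hfg : ∀ y, f y = g y) (a b : List Char) :
    (if c then f a else f b) = g (if c then a else b) := by
  split <;> apply hfg

theorem goA_eq_goB : ∀ (fuel : Nat) (x : List Char), fixCommaGoA fuel x = fixCommaGoB fuel x := by
  intro fuel
  induction fuel with
  | zero => intro x; rfl
  | succ n ih =>
    intro x
    rw [fixCommaGoA, fixCommaGoB]
    have hfun : (fun (h : List (List Char)) (i : List Char) =>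
        if 1 < PySem.Chars.len i then h ++ [i] else h)
        = (fun acc xx => if (fun p => decide (1 < PySem.Chars.len p)) xx = true
            then acc ++ [id xx] else acc) := by
      funext a b; simp
    rw [hfun, PySem.List.foldl_append_if]
    simp only [List.map_id, List.nil_append]
    rw [splitOn_len_one_iff _ _ (by decide)]
    cases hIn : PySem.Chars.isIn "P.O.".toList
      (if PySem.Chars.len (PySem.Chars.join ", ".toList
          ((PySem.Chars.splitOn (PySem.Chars.replace x "None".toList []) ",".toList).filter
            (fun i => decide (1 < PySem.Chars.len i)))) < 2 then "<MISSING>".toList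
       else PySem.Chars.join ", ".toList
          ((PySem.Chars.splitOn (PySem.Chars.replace x "None".toList []) ",".toList).filter
            (fun i => decide (1 < PySem.Chars.len i)))) with
    | false => simp
    | true =>
      simp only [Bool.not_true, Bool.false_eq_true, if_false, if_true]
      exact ite_call_arg _ _ _ ih _ _

-- ===== VERDICT (by name: the statement is the Claim_ definition above) =====
theorem fix_comma_spec : Claim_equal_fix_comma := by
  intro x _
  unfold Spec_fix_comma fix_comma fix_comma_alt
  rw [goA_eq_goB]
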